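-- pv_equiv track=rewrite | github.com/ewoest/advent-of-code | day14/puzzle2.py | count_north_load
-- ===== SOURCE A (Python) =====
-- def count_north_load(matrix):
--     load = 0
--
--     num_rows = len(matrix)
--     for y in range(num_rows):
--         for x in range(len(matrix[y])):
--             if matrix[y][x] == "O":
--                 load += (num_rows - y)
--
--     return load
-- ===== SOURCE B (Python) =====
-- def count_north_load(matrix):
--     # Running prefix-count formulation: each rock in row y contributes 1 to the
--     # load for every row index t >= y, so load = sum over rows of the running
--     # rock count seen so far. No row weights, no len(matrix) needed.
--     load = 0
--     rocks = 0
--     for row in matrix: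
--         for cell in row:
--             if cell == "O":
--                 rocks += 1
--         load += rocks
--     return load
-- ===== Notes on version B (the rewrite author's own statement) =====
-- stated objective: alternative
-- what changed: Replaces the weighted per-cell sum (num_rows - y added per rock) by a prefix-sum formulation: a single top-down pass keeps a running rock count and adds that running count once per row, so no row weight or len(matrix) is ever computed.
import Mathlib
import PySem

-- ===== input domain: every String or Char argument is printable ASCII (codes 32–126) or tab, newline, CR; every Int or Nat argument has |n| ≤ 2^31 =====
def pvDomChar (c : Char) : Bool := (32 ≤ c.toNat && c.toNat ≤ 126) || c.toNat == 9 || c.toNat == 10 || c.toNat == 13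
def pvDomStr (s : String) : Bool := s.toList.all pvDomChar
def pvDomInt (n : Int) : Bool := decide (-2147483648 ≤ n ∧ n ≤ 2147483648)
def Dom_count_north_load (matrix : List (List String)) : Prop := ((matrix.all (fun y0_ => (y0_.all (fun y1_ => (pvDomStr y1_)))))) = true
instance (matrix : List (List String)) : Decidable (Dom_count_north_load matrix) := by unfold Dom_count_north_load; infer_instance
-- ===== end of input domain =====

-- B replaces A's weighted per-cell sum by a prefix-sum pass: a running rock count is added once per row; same result.

-- ===== PORT A =====
def count_north_load (matrix : List (List String)) : Int :=
  let num_rows := matrix.length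
  (List.range num_rows).foldl (fun load y =>
    (List.range (matrix.getD y []).length).foldl (fun load x =>
      if (matrix.getD y []).getD x "" == "O" then load + ((num_rows : Int) - (y : Int)) else load) load) 0

-- ===== PORT B =====
def count_north_load_alt (matrix : List (List String)) : Int :=
  (matrix.foldl (fun (st : Int × Int) row =>
      let rocks := row.foldl (fun r cell => if cell == "O" then r + 1 else r) st.2
      (st.1 + rocks, rocks)) (0, 0)).1

-- ===== PRECONDITION & SPEC =====
def Spec_count_north_load (matrix : List (List String)) (out : Int) : Prop := out = count_north_load_alt matrix
instance (matrix : List (List String)) (out : Int) : Decidable (Spec_count_north_load matrix out) := by unfold Spec_count_north_load; infer_instance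

-- ===== CLAIM (what is proved, stated in full; the proofs are below) =====
def Claim_equal_count_north_load : Prop := ∀ (matrix : List (List String)), Dom_count_north_load matrix → Spec_count_north_load matrix (count_north_load matrix)

-- ===== LEMMAS AND PROOFS =====

-- The weighted sum Σ_y (n - y) * count(row_y, "O"), written recursively; both ports are proved equal to it.
def pvWsum : List (List String) → Int
  | [] => 0
  | r :: rest => ((rest.length : Int) + 1) * (PySem.List.count r "O" : Int) + pvWsum rest

-- A's inner loop over one row adds the weight w once per "O": it equals acc + w * count.
theorem pv_inner (row : List String) (w acc : Int) :
    (List.range row.length).foldl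
      (fun load x => if row.getD x "" == "O" then load + w else load) acc
    = acc + w * (PySem.List.count row "O" : Int) := by
  induction row generalizing acc with
  | nil => simp [PySem.List.count]
  | cons r rest ih =>
    rw [List.length_cons, List.range_succ_eq_map, List.foldl_cons, List.foldl_map]
    simp only [List.getD_cons_zero, List.getD_cons_succ]
    rw [ih]
    simp only [PySem.List.count_eq, List.count_cons]
    by_cases h : r == "O" <;> simp [h] <;> ring

-- A's outer loop equals the weighted sum, generalized over the weight offset (n = s + length).
theorem pv_outer (m : List (List String)) (n s acc : Int) (h : n = s + m.length) :
    (List.range m.length).foldl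
      (fun (load : Int) (y : Nat) => load + (n - (s + (y : Int))) * (PySem.List.count (m.getD y []) "O" : Int)) acc
    = acc + pvWsum m := by
  induction m generalizing s acc with
  | nil => simp [pvWsum]
  | cons r rest ih =>
    rw [List.length_cons, List.range_succ_eq_map, List.foldl_cons, List.foldl_map]
    simp only [List.getD_cons_zero, List.getD_cons_succ]
    have hfun : (fun (load : Int) (y : Nat) =>
        load + (n - (s + ((y + 1 : Nat) : Int))) * (PySem.List.count (rest.getD y []) "O" : Int))
      = (fun (load : Int) (y : Nat) =>
        load + (n - ((s + 1) + (y : Int))) * (PySem.List.count (rest.getD y []) "O" : Int)) := by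
      funext load y; push_cast; ring
    rw [hfun]
    rw [ih (s + 1) (acc + (n - (s + ((0 : Nat) : Int))) * (PySem.List.count r "O" : Int))
        (by simp only [List.length_cons] at h; push_cast at h ⊢; omega)]
    simp only [pvWsum]
    have hw : n - (s + ((0 : Nat) : Int)) = (rest.length : Int) + 1 := by
      simp only [List.length_cons] at h; push_cast at h ⊢; omega
    rw [hw]; ring

-- B's inner loop counts the "O" cells on top of the running count.
theorem pv_count (row : List String) (r : Int) :
    row.foldl (fun r cell => if cell == "O" then r + 1 else r) r
    = r + (PySem.List.count row "O" : Int) := by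
  induction row generalizing r with
  | nil => simp [PySem.List.count]
  | cons c rest ih =>
    rw [List.foldl_cons, ih]
    simp only [PySem.List.count_eq, List.count_cons]
    by_cases h : c == "O" <;> simp [h] <;> ring

-- B's outer fold from state (L, R) produces L + length * R + the weighted sum.
theorem pv_fold (m : List (List String)) (L R : Int) :
    (m.foldl (fun (st : Int × Int) row =>
        let rocks := row.foldl (fun r cell => if cell == "O" then r + 1 else r) st.2
        (st.1 + rocks, rocks)) (L, R)).1
    = L + (m.length : Int) * R + pvWsum m := by
  induction m generalizing L R with
  | nil => simp [pvWsum]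
  | cons r rest ih =>
    rw [List.foldl_cons]
    show (List.foldl _ (L + (r.foldl (fun r cell => if cell == "O" then r + 1 else r) R),
      r.foldl (fun r cell => if cell == "O" then r + 1 else r) R) rest).1 = _
    rw [pv_count, ih]
    simp only [pvWsum, List.length_cons]
    push_cast
    ring

-- ===== VERDICT (by name: the statement is the Claim_ definition above) =====
theorem count_north_load_spec : Claim_equal_count_north_load := by
  intro matrix _
  unfold Spec_count_north_load count_north_load count_north_load_alt
  have hfun : (fun (load : Int) (y : Nat) =>
      (List.range (matrix.getD y []).length).foldl (fun load x =>
        if (matrix.getD y []).getD x "" == "O" then load + ((matrix.length : Int) - (y : Int)) else load) load)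
    = (fun (load : Int) (y : Nat) =>
      load + ((matrix.length : Int) - ((0 : Int) + (y : Int))) * (PySem.List.count (matrix.getD y []) "O" : Int)) := by
    funext load y
    rw [pv_inner]
    ring_nf
  simp only [hfun]
  rw [pv_outer matrix (matrix.length : Int) 0 0 (by simp), pv_fold]
  simp
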